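-- pv_equiv track=rewrite | github.com/hatemile/hatemile-for-python | hatemile/implementation/accessibletableimpl.py | validateHeader
-- ===== SOURCE A (Python) =====
-- def validateHeader(header):
-- 	if not bool(header):
-- 		return False
-- 	length = -1
-- 	for elements in header:
-- 		if not bool(elements):
-- 			return False
-- 		elif length == -1:
-- 			length = len(elements)
-- 		elif len(elements) != length:
-- 			return False
-- 	return True
-- ===== SOURCE B (Python) =====
-- def validateHeader(header):
--     if not header:
--         return False
--     for e in header:
--         if not e:
--             return False
--     return len({len(e) for e in header}) == 1
-- ===== Notes on version B (the rewrite author's own statement) =====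
-- stated objective: simpler
-- what changed: Replaces the sentinel-tracked first-length comparison with a truthiness pass followed by collecting all row lengths into a set and checking the set has exactly one element.
import Mathlib
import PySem

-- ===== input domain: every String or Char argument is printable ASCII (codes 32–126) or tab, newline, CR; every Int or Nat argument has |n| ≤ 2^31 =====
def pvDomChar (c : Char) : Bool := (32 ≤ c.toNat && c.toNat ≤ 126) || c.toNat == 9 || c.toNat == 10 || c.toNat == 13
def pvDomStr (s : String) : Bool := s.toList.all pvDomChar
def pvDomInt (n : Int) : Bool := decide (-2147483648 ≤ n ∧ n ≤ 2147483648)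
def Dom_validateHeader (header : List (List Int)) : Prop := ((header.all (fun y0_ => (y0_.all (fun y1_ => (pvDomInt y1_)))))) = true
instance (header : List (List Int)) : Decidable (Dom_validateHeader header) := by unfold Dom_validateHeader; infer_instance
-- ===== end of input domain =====

-- B replaces A's sentinel-tracked first-length comparison by a truthiness pass
-- followed by a set of row lengths, checked to have exactly one element (simpler decomposition).


-- ===== PORT A =====
-- the 'for elements in header' loop with its 'length' sentinel, step for step
def validateHeaderLoop (rows : List (List Int)) (length : Int) : Bool :=
  match rows with
  | [] => true
  | e :: rest =>
    if e.isEmpty then false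
    else if length == -1 then validateHeaderLoop rest (e.length : Int)
    else if (e.length : Int) != length then false
    else validateHeaderLoop rest length

def validateHeader (header : List (List Int)) : Bool :=
  if header.isEmpty then false
  else validateHeaderLoop header (-1)

-- ===== PORT B =====
def validateHeader_alt (header : List (List Int)) : Bool :=
  if header.isEmpty then false
  else if header.any (fun e => e.isEmpty) then false
  else PySem.Set.len (PySem.Set.ofList (header.map (fun e => (e.length : Int)))) == 1

-- ===== PRECONDITION & SPEC =====
def Spec_validateHeader (header : List (List Int)) (out : Bool) : Prop := out = validateHeader_alt header
instance (header : List (List Int)) (out : Bool) : Decidable (Spec_validateHeader header out) := by unfold Spec_validateHeader; infer_instance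

-- ===== CLAIM (what is proved, stated in full; the proofs are below) =====
def Claim_equal_validateHeader : Prop := ∀ (header : List (List Int)), Dom_validateHeader header → Spec_validateHeader header (validateHeader header)

-- ===== LEMMAS AND PROOFS =====

-- A's loop after the sentinel is set: every remaining row is nonempty and of length n
theorem validateHeaderLoop_set (rows : List (List Int)) (n : Int) (hn : 0 ≤ n) :
    validateHeaderLoop rows n = rows.all (fun e => !e.isEmpty && (e.length : Int) == n) := by
  induction rows with
  | nil => rfl
  | cons e rest ih =>
    simp only [validateHeaderLoop, List.all_cons]
    by_cases he : e.isEmpty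
    · simp [he]
    · have hne : (n == -1) = false := beq_eq_false_iff_ne.mpr (by omega)
      simp only [he, if_false, hne, Bool.false_eq_true]
      by_cases hl : (e.length : Int) = n
      · simp [hl, ih]
      · simp [hl]

-- set of lengths has size 1 iff every length equals the first
theorem ofList_len_one (a : Int) (l : List Int) :
    (PySem.Set.len (PySem.Set.ofList (a :: l)) == 1) = l.all (fun x => x == a) := by
  induction l with
  | nil => rfl
  | cons b t ih =>
    by_cases hb : b = a
    · subst hb
      simpa [PySem.Set.ofList, PySem.Set.add, List.foldl] using ih
    · have hrhs : ((b :: t).all fun x => x == a) = false := by simp [hb]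
      rw [hrhs]
      -- the set contains both a and b, so its length is ≥ 2
      have ha : a ∈ PySem.Set.ofList (a :: b :: t) := by
        simp [PySem.Set.mem_ofList]
      have hbm : b ∈ PySem.Set.ofList (a :: b :: t) := by
        simp [PySem.Set.mem_ofList]
      have hnd : (PySem.Set.ofList (a :: b :: t)).Nodup := PySem.Set.nodup_ofList _
      have hsub : ({a, b} : Finset Int) ⊆ (PySem.Set.ofList (a :: b :: t)).toFinset := by
        intro x hx
        simp only [Finset.mem_insert, Finset.mem_singleton] at hx
        rcases hx with rfl | rfl <;> simpa [List.mem_toFinset] using ‹_ ∈ _›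
      have h2 : 2 ≤ (PySem.Set.ofList (a :: b :: t)).length := by
        have hcard := Finset.card_le_card hsub
        rw [Finset.card_pair (fun h => hb h.symm), List.toFinset_card_of_nodup hnd] at hcard
        exact hcard
      have hne1 : (PySem.Set.ofList (a :: b :: t)).length ≠ 1 := by omega
      simp [PySem.Set.len, hne1]

-- merging the truthiness pass with the length comparison
theorem combine_all (rest : List (List Int)) (n : Int) :
    (rest.all fun e => !e.isEmpty && ((e.length : Int) == n))
      = (!rest.any (fun e => e.isEmpty) && (rest.map fun e => (e.length : Int)).all (fun x => x == n)) := by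
  induction rest with
  | nil => rfl
  | cons h t ih =>
    cases hh : h.isEmpty <;>
      simp [List.all_cons, List.any_cons, hh, ih, Bool.and_left_comm]

-- ===== VERDICT (by name: the statement is the Claim_ definition above) =====
theorem validateHeader_spec : Claim_equal_validateHeader := by
  intro header _
  unfold Spec_validateHeader validateHeader validateHeader_alt
  cases header with
  | nil => rfl
  | cons e rest =>
    simp only [List.isEmpty_cons, if_false, Bool.false_eq_true]
    simp only [validateHeaderLoop]
    by_cases he : e.isEmpty
    · simp [he]
    · simp only [he, Bool.false_eq_true, if_false]
      rw [validateHeaderLoop_set rest (e.length : Int) (by positivity)]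
      rw [combine_all]
      simp only [List.any_cons, he, Bool.false_or, List.map_cons]
      rw [ofList_len_one]
      cases hr : rest.any (fun e => e.isEmpty) <;> simp
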